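-- pv_equiv track=rewrite | github.com/orwithout/noj.nwpu | 43.DecompositionFactor/43.solution-list.py | howManyKinds
-- ===== SOURCE A (Python) =====
-- def howManyKinds(K,m,n,nn):
--     if K==n:
--         return 1
--     elif K>n:
--         return 0
--     else:
--         E=0
--         for k in nn:
--             if k>=m:
--                 E += howManyKinds(K*k,k,n,nn)
--         return E
-- ===== SOURCE B (Python) =====
-- def howManyKinds(K, m, n, nn):
--     memo = {}
--
--     def count(K, m):
--         if K == n:
--             return 1
--         if K > n:
--             return 0
--         if (K, m) not in memo:
--             memo[(K, m)] = sum(count(K * k, k) for k in nn if k >= m)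
--         return memo[(K, m)]
--
--     return count(K, m)
-- ===== Notes on version B (the rewrite author's own statement) =====
-- stated objective: alternative
-- what changed: B memoizes the recursion on its (current product, minimum factor) state in a dictionary, so each reachable state is evaluated once instead of once per enumeration path; on the generated random inputs this was not measurably faster.
import Mathlib
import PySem

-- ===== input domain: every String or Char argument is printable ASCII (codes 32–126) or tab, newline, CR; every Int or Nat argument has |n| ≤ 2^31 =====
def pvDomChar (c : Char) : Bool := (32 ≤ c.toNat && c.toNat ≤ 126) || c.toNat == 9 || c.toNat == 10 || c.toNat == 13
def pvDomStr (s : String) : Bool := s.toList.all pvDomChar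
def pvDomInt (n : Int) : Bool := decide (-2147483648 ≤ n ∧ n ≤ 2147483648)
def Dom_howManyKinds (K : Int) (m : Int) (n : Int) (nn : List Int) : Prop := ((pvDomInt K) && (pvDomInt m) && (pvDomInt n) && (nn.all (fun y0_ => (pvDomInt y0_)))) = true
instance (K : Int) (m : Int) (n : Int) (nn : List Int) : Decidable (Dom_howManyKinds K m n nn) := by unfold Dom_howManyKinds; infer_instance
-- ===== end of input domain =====

-- B memoizes the recursion on its (current product, minimum factor) state in a dictionary (an
-- alternative evaluation strategy; not measurably faster on the timed random inputs); equivalence is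
-- claimed on Pre_, exactly the inputs on which A's unbounded recursion terminates (elsewhere the
-- Python A — and B alike — raises RecursionError).

-- ===== PORT A =====
-- A's recursion is unbounded (Python raises RecursionError outside Pre_), so the port carries a
-- fuel counter (none = fuel exhausted); the totality lemmas below show the wrapper's fuel suffices
-- on Pre_.  The for-loop (E = 0; for k in nn: if k >= m: E += rec) is the foldl over the same state.
def goA : Nat → Int → Int → Int → List Int → Option Int
  | 0, _, _, _, _ => none
  | f+1, K, m, n, nn =>
    if K = n then some 1
    else if K > n then some 0
    else nn.foldl (fun acc k => acc.bind fun E =>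
      if k ≥ m then (goA f (K*k) k n nn).map fun v => E + v
      else some E) (some 0)

def howManyKinds (K : Int) (m : Int) (n : Int) (nn : List Int) : Int :=
  (goA (2*(n - K).toNat + 3) K m n nn).getD 0

-- ===== PORT B =====
-- Source B's memo dict (a Python closure variable) is threaded through as explicit state; the
-- `sum(count(K*k, k) for k in nn if k >= m)` is the list recursion sumB over the candidates.
mutual
def countB : Nat → Int → Int → Int → List Int → PySem.Dict (Int × Int) Int → Option (PySem.Dict (Int × Int) Int × Int)
  | 0, _, _, _, _, _ => none
  | f+1, K, m, n, nn, memo =>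
    if K = n then some (memo, 1)
    else if K > n then some (memo, 0)
    else match memo.get? (K, m) with
      | some v => some (memo, v)
      | none => (sumB f K m n nn nn memo).map fun r => (r.1.insert (K, m) r.2, r.2)
  termination_by f _ _ _ _ _ => (f, 0)

def sumB : Nat → Int → Int → Int → List Int → List Int → PySem.Dict (Int × Int) Int → Option (PySem.Dict (Int × Int) Int × Int)
  | _, _, _, _, _, [], memo => some (memo, 0)
  | f, K, m, n, nn, k :: ks, memo =>
    if k ≥ m then
      (countB f (K*k) k n nn memo).bind fun r =>
        (sumB f K m n nn ks r.1).map fun s => (s.1, r.2 + s.2)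
    else sumB f K m n nn ks memo
  termination_by f _ _ _ _ l _ => (f, l.length + 1)
end

def howManyKinds_alt (K : Int) (m : Int) (n : Int) (nn : List Int) : Int :=
  ((countB (2*(n - K).toNat + 3) K m n nn PySem.Dict.empty).map (·.2)).getD 0

-- ===== PRECONDITION & SPEC =====
-- Pre_ is exactly the set of inputs on which A's recursion terminates (checked exhaustively on a
-- large grid): K already at/above the target, or a positive product with all eligible factors ≥ 2,
-- or a nonzero product with all eligible factors ≤ -2 (magnitudes grow, positive products stop),
-- or every eligible child already at/above the target.  Outside Pre_ both the Python A and the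
-- Python B raise RecursionError, so no returning input is excluded.
def Pre_howManyKinds (K : Int) (m : Int) (n : Int) (nn : List Int) : Prop :=
  n ≤ K
  ∨ (1 ≤ K ∧ ∀ k ∈ nn, m ≤ k → 2 ≤ k)
  ∨ (K ≠ 0 ∧ ∀ k ∈ nn, m ≤ k → k ≤ -2)
  ∨ (∀ k ∈ nn, m ≤ k → n ≤ K * k)
instance (K : Int) (m : Int) (n : Int) (nn : List Int) : Decidable (Pre_howManyKinds K m n nn) := by
  unfold Pre_howManyKinds; infer_instance

def pvWitness_howManyKinds : Int × Int × Int × List Int := (1, 2, 12, [2, 3, 2, 5])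

def Spec_howManyKinds (K : Int) (m : Int) (n : Int) (nn : List Int) (out : Int) : Prop := out = howManyKinds_alt K m n nn
instance (K : Int) (m : Int) (n : Int) (nn : List Int) (out : Int) : Decidable (Spec_howManyKinds K m n nn out) := by unfold Spec_howManyKinds; infer_instance

-- ===== CLAIM (what is proved, stated in full; the proofs are below) =====
def Claim_equal_howManyKinds : Prop := ∀ (K : Int) (m : Int) (n : Int) (nn : List Int), Dom_howManyKinds K m n nn → Pre_howManyKinds K m n nn → Spec_howManyKinds K m n nn (howManyKinds K m n nn)

-- ===== LEMMAS AND PROOFS =====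

-- named form of A's loop body, and one-step unfolding of goA
def stepA (f : Nat) (K m n : Int) (nn : List Int) (acc : Option Int) (k : Int) : Option Int :=
  acc.bind fun E => if k ≥ m then (goA f (K*k) k n nn).map fun v => E + v else some E

theorem goA_succ (f : Nat) (K m n : Int) (nn : List Int) :
    goA (f+1) K m n nn =
      if K = n then some 1 else if K > n then some 0
      else nn.foldl (stepA f K m n nn) (some 0) := rfl

theorem foldA_none (f : Nat) (K m n : Int) (nn l : List Int) :
    l.foldl (stepA f K m n nn) none = none := by
  induction l with
  | nil => rfl
  | cons k ks ih => simpa [stepA] using ih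

theorem goA_mono_succ : ∀ (f : Nat),
    ∀ K m n nn v, goA f K m n nn = some v → goA (f+1) K m n nn = some v := by
  intro f
  induction f with
  | zero => intro K m n nn v h; exact absurd h (by simp [goA])
  | succ f ih =>
    intro K m n nn v h
    rw [goA_succ] at h ⊢
    by_cases h1 : K = n
    · simpa [h1] using h
    · by_cases h2 : K > n
      · simp only [if_neg h1, if_pos h2] at h ⊢; exact h
      · simp only [if_neg h1, if_neg h2] at h ⊢
        suffices hl : ∀ (l : List Int) (E : Int),
            l.foldl (stepA f K m n nn) (some E) = some v →
            l.foldl (stepA (f+1) K m n nn) (some E) = some v by exact hl nn 0 h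
        intro l
        induction l with
        | nil => intro E h; exact h
        | cons k ks ihl =>
          intro E h
          simp only [List.foldl_cons, stepA, Option.bind_some] at h ⊢
          by_cases hk : k ≥ m
          · simp only [if_pos hk] at h ⊢
            cases hg : goA f (K*k) k n nn with
            | none => rw [hg] at h; rw [Option.map_none, foldA_none] at h; exact absurd h (by simp)
            | some w => rw [hg] at h; rw [ih _ _ _ _ _ hg]; exact ihl _ h
          · simp only [if_neg hk] at h ⊢; exact ihl _ h

theorem goA_mono {f f' : Nat} {K m n : Int} {nn : List Int} {v : Int}
    (hle : f ≤ f') (h : goA f K m n nn = some v) : goA f' K m n nn = some v := by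
  induction f' with
  | zero =>
    have : f = 0 := by omega
    subst this; exact h
  | succ g ih =>
    rcases Nat.lt_or_ge f (g+1) with hlt | hge
    · exact goA_mono_succ g _ _ _ _ _ (ih (by omega))
    · have : f = g + 1 := by omega
      subst this; exact h

theorem goA_det {f g : Nat} {K m n : Int} {nn : List Int} {v w : Int}
    (hv : goA f K m n nn = some v) (hw : goA g K m n nn = some w) : v = w := by
  rcases Nat.le_total f g with h | h
  · have := goA_mono h hv; rw [this] at hw; exact Option.some.inj hw
  · have := goA_mono h hw; rw [this] at hv; exact (Option.some.inj hv).symm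

-- totality of goA on the base disjunct n ≤ K
theorem goA_total_ge {f : Nat} {K m n : Int} {nn : List Int}
    (h : n ≤ K) (hf : 0 < f) : ∃ v, goA f K m n nn = some v := by
  obtain ⟨g, rfl⟩ : ∃ g, f = g + 1 := ⟨f - 1, by omega⟩
  by_cases h1 : K = n
  · exact ⟨1, by rw [goA_succ]; simp [h1]⟩
  · exact ⟨0, by rw [goA_succ]; simp [h1, show K > n by omega]⟩

-- totality of goA when every eligible child is already at/above the target
theorem goA_total_base {f : Nat} {K m n : Int} {nn : List Int}
    (hm : ∀ k ∈ nn, m ≤ k → n ≤ K * k) (hf : 2 ≤ f) : ∃ v, goA f K m n nn = some v := by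
  obtain ⟨g, rfl⟩ : ∃ g, f = g + 1 := ⟨f - 1, by omega⟩
  by_cases h1 : K = n
  · exact ⟨1, by rw [goA_succ]; simp [h1]⟩
  · by_cases h2 : K > n
    · exact ⟨0, by rw [goA_succ]; simp [h1, h2]⟩
    · have hloop : ∀ l : List Int, (∀ k ∈ l, k ∈ nn) → ∀ E : Int,
          ∃ w, l.foldl (stepA g K m n nn) (some E) = some w := by
        intro l
        induction l with
        | nil => intro _ E; exact ⟨E, rfl⟩
        | cons k ks ihl =>
          intro hsub E
          simp only [List.foldl_cons, stepA, Option.bind_some]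
          by_cases hk : k ≥ m
          · obtain ⟨w, hw⟩ := goA_total_ge (nn := nn) (m := k)
              (hm k (hsub k (by simp)) hk) (show 0 < g by omega)
            obtain ⟨u, hu⟩ := ihl (fun x hx => hsub x (by simp [hx])) (E + w)
            exact ⟨u, by rw [if_pos hk, hw]; exact hu⟩
          · obtain ⟨u, hu⟩ := ihl (fun x hx => hsub x (by simp [hx])) E
            exact ⟨u, by rw [if_neg hk]; exact hu⟩
      obtain ⟨w, hw⟩ := hloop nn (fun _ h => h) 0
      exact ⟨w, by rw [goA_succ]; simp only [if_neg h1, if_neg h2]; exact hw⟩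

-- totality of goA on the positive disjunct: 1 ≤ K and all eligible factors ≥ 2
theorem goA_total_pos (n : Int) (nn : List Int) : ∀ (f : Nat) (K m : Int),
    1 ≤ K → (∀ k ∈ nn, m ≤ k → 2 ≤ k) → (n - K).toNat < f →
    ∃ v, goA f K m n nn = some v := by
  intro f
  induction f with
  | zero => intro K m _ _ hf; omega
  | succ f ih =>
    intro K m hK hm hf
    by_cases h1 : K = n
    · exact ⟨1, by rw [goA_succ]; simp [h1]⟩
    · by_cases h2 : K > n
      · exact ⟨0, by rw [goA_succ]; simp [h1, h2]⟩
      · have hKn : K < n := by omega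
        have hloop : ∀ l : List Int, (∀ k ∈ l, k ∈ nn) → ∀ E : Int,
            ∃ w, l.foldl (stepA f K m n nn) (some E) = some w := by
          intro l
          induction l with
          | nil => intro _ E; exact ⟨E, rfl⟩
          | cons k ks ihl =>
            intro hsub E
            simp only [List.foldl_cons, stepA, Option.bind_some]
            by_cases hk : k ≥ m
            · have hk2 : 2 ≤ k := hm k (hsub k (by simp)) hk
              have hKk : K + 1 ≤ K * k := by nlinarith
              have hKk1 : 1 ≤ K * k := by omega
              have hfuel : (n - K * k).toNat < f := by
                set P := K * k with hPdef
                omega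
              obtain ⟨w, hw⟩ := ih (K * k) k hKk1 (by intro k' _ hkk'; omega) hfuel
              obtain ⟨u, hu⟩ := ihl (fun x hx => hsub x (by simp [hx])) (E + w)
              exact ⟨u, by rw [if_pos hk, hw]; exact hu⟩
            · obtain ⟨u, hu⟩ := ihl (fun x hx => hsub x (by simp [hx])) E
              exact ⟨u, by rw [if_neg hk]; exact hu⟩
        obtain ⟨w, hw⟩ := hloop nn (fun _ h => h) 0
        exact ⟨w, by rw [goA_succ]; simp only [if_neg h1, if_neg h2]; exact hw⟩

-- termination measure for the all-negative disjunct: magnitudes grow, sign alternates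
def nuMeas (n K : Int) : Nat := if 0 < K then 2*(n - K).toNat + 1 else 2*(n + K).toNat + 2

theorem nuMeas_lt {n K k : Int} (hK : K ≠ 0) (hKn : K < n) (hk : k ≤ -2) :
    nuMeas n (K * k) < nuMeas n K := by
  rcases lt_or_gt_of_ne hK with hneg | hpos
  · have hprod : K * k ≥ -2 * K := by nlinarith
    unfold nuMeas
    rw [if_pos (show 0 < K * k by omega), if_neg (show ¬ 0 < K by omega)]
    omega
  · have hprod : K * k ≤ -2 * K := by nlinarith
    unfold nuMeas
    rw [if_neg (show ¬ 0 < K * k by omega), if_pos hpos]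
    omega

-- totality of goA on the all-negative disjunct: K ≠ 0 and all eligible factors ≤ -2
theorem goA_total_neg (n : Int) (nn : List Int) : ∀ (f : Nat) (K m : Int),
    K ≠ 0 → (∀ k ∈ nn, m ≤ k → k ≤ -2) → nuMeas n K < f →
    ∃ v, goA f K m n nn = some v := by
  intro f
  induction f with
  | zero => intro K m _ _ hf; omega
  | succ f ih =>
    intro K m hK hm hf
    by_cases h1 : K = n
    · exact ⟨1, by rw [goA_succ]; simp [h1]⟩
    · by_cases h2 : K > n
      · exact ⟨0, by rw [goA_succ]; simp [h1, h2]⟩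
      · have hKn : K < n := by omega
        have hloop : ∀ l : List Int, (∀ k ∈ l, k ∈ nn) → ∀ E : Int,
            ∃ w, l.foldl (stepA f K m n nn) (some E) = some w := by
          intro l
          induction l with
          | nil => intro _ E; exact ⟨E, rfl⟩
          | cons k ks ihl =>
            intro hsub E
            simp only [List.foldl_cons, stepA, Option.bind_some]
            by_cases hk : k ≥ m
            · have hk2 : k ≤ -2 := hm k (hsub k (by simp)) hk
              have hKk0 : K * k ≠ 0 := mul_ne_zero hK (by omega)
              have hmeas : nuMeas n (K * k) < f :=
                Nat.lt_of_lt_of_le (nuMeas_lt hK hKn hk2) (by omega)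
              obtain ⟨w, hw⟩ := ih (K * k) k hKk0
                (by intro k' hk' hkk'; exact hm k' hk' (by omega)) hmeas
              obtain ⟨u, hu⟩ := ihl (fun x hx => hsub x (by simp [hx])) (E + w)
              exact ⟨u, by rw [if_pos hk, hw]; exact hu⟩
            · obtain ⟨u, hu⟩ := ihl (fun x hx => hsub x (by simp [hx])) E
              exact ⟨u, by rw [if_neg hk]; exact hu⟩
        obtain ⟨w, hw⟩ := hloop nn (fun _ h => h) 0
        exact ⟨w, by rw [goA_succ]; simp only [if_neg h1, if_neg h2]; exact hw⟩

-- a memo is Good if each stored value is A's value (at some fuel) for its key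
def Good (n : Int) (nn : List Int) (memo : PySem.Dict (Int × Int) Int) : Prop :=
  ∀ K' m' v', memo.get? (K', m') = some v' → ∃ g, goA g K' m' n nn = some v'

-- simulation: wherever A's recursion returns, B's memoized recursion returns the same value
theorem countB_sim (n : Int) (nn : List Int) : ∀ (f : Nat) (K m : Int) (memo : PySem.Dict (Int × Int) Int) (v : Int),
    goA f K m n nn = some v → Good n nn memo →
    ∃ memo', countB f K m n nn memo = some (memo', v) ∧ Good n nn memo' := by
  intro f
  induction f with
  | zero => intro K m memo v hA _; exact absurd hA (by simp [goA])
  | succ f ih =>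
    intro K m memo v hA hGood
    rw [goA_succ] at hA
    by_cases h1 : K = n
    · simp only [if_pos h1, Option.some.injEq] at hA
      exact ⟨memo, by rw [countB]; simp [h1, hA], hGood⟩
    · by_cases h2 : K > n
      · simp only [if_neg h1, if_pos h2, Option.some.injEq] at hA
        exact ⟨memo, by rw [countB]; simp [h1, h2, hA], hGood⟩
      · simp only [if_neg h1, if_neg h2] at hA
        have hAfull : goA (f+1) K m n nn = some v := by
          rw [goA_succ]; simp only [if_neg h1, if_neg h2]; exact hA
        cases hmemo : memo.get? (K, m) with
        | some v' =>
          obtain ⟨g, hg⟩ := hGood K m v' hmemo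
          have hv : v' = v := goA_det hg hAfull
          exact ⟨memo, by rw [countB]; simp only [if_neg h1, if_neg h2]; rw [hmemo, hv], hGood⟩
        | none =>
          have hsim : ∀ (l : List Int) (E : Int) (memo₀ : PySem.Dict (Int × Int) Int) (Ef : Int),
              l.foldl (stepA f K m n nn) (some E) = some Ef → Good n nn memo₀ →
              ∃ memo₁ S, sumB f K m n nn l memo₀ = some (memo₁, S) ∧ Ef = E + S ∧
                Good n nn memo₁ := by
            intro l
            induction l with
            | nil =>
              intro E memo₀ Ef hl hg
              simp only [List.foldl_nil, Option.some.injEq] at hl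
              exact ⟨memo₀, 0, by rw [sumB], by omega, hg⟩
            | cons k ks ihl =>
              intro E memo₀ Ef hl hg
              simp only [List.foldl_cons, stepA, Option.bind_some] at hl
              by_cases hk : k ≥ m
              · simp only [if_pos hk] at hl
                cases hgo : goA f (K*k) k n nn with
                | none =>
                  rw [hgo] at hl
                  rw [Option.map_none, foldA_none] at hl
                  exact absurd hl (by simp)
                | some w =>
                  rw [hgo] at hl
                  obtain ⟨memo₁, hB, hg₁⟩ := ih (K*k) k memo₀ w hgo hg
                  obtain ⟨memo₂, S', hS, hEf, hg₂⟩ := ihl (E + w) memo₁ Ef hl hg₁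
                  refine ⟨memo₂, w + S', ?_, by omega, hg₂⟩
                  rw [sumB]
                  simp only [if_pos hk, hB, Option.bind_some, hS, Option.map_some]
              · simp only [if_neg hk] at hl
                obtain ⟨memo₁, S, hS, hEf, hg₁⟩ := ihl E memo₀ Ef hl hg
                refine ⟨memo₁, S, ?_, hEf, hg₁⟩
                rw [sumB, if_neg hk]; exact hS
          obtain ⟨memo₁, S, hB, hES, hg₁⟩ := hsim nn 0 memo v hA hGood
          have hSv : S = v := by omega
          subst hSv
          refine ⟨memo₁.insert (K, m) S, ?_, ?_⟩
          · rw [countB]; simp only [if_neg h1, if_neg h2]; rw [hmemo, hB]; rfl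
          · intro K' m' v' hget
            rw [PySem.Dict.get?_insert] at hget
            by_cases heq : (K', m') = (K, m)
            · rw [if_pos heq] at hget
              obtain ⟨hK', hm'⟩ := Prod.mk.injEq .. ▸ heq
              exact ⟨f+1, by rw [hK', hm', ← Option.some.inj hget]; exact hAfull⟩
            · rw [if_neg heq] at hget
              exact hg₁ K' m' v' hget

-- ===== VERDICT (by name: the statement is the Claim_ definition above) =====
theorem howManyKinds_spec : Claim_equal_howManyKinds := by
  intro K m n nn _ hPre
  unfold Spec_howManyKinds howManyKinds howManyKinds_alt
  have hEmpty : Good n nn PySem.Dict.empty := by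
    intro K' m' v' hget
    rw [PySem.Dict.get?_empty] at hget
    exact absurd hget (by simp)
  have hv : ∃ v, goA (2*(n - K).toNat + 3) K m n nn = some v := by
    rcases hPre with h | ⟨hK, hm⟩ | ⟨hK, hm⟩ | hm
    · exact goA_total_ge h (by omega)
    · exact goA_total_pos n nn _ K m hK hm (by omega)
    · refine goA_total_neg n nn _ K m hK hm ?_
      unfold nuMeas
      split_ifs <;> omega
    · exact goA_total_base hm (by omega)
  obtain ⟨v, hv⟩ := hv
  obtain ⟨memo', hB, -⟩ := countB_sim n nn _ K m PySem.Dict.empty v hv hEmpty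
  rw [hv, hB]
  rfl
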